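-- pv_equiv track=rewrite | github.com/skytwosea/advent_of_code | 2024/02_2024/solution.py | _validate_tolerant
-- ===== SOURCE A (Python) =====
-- def _validate_exact(report) -> bool:
--     if not report:
--         return False
--     direction = True if report[0] - report[1] < 0 else False
--     for n in range(len(report) - 1):
--         step = report[n] - report[n + 1]
--         if (step == 0 or (step < 0) != direction or abs(step) > 3):
--             return False
--     return True
--
-- def _validate_tolerant(report) -> bool:
--     if _validate_exact(report):
--         return True
--     for i in range(len(report)):
--         _report = report.copy()
--         _ = _report.pop(i)
--         if _validate_exact(_report):
--             return True
--     return False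
-- ===== SOURCE B (Python) =====
-- def _first_violation(report):
--     """Index of the first adjacent pair violating the step rule, or None."""
--     d = report[0] < report[1]
--     for k in range(len(report) - 1):
--         step = report[k] - report[k + 1]
--         if step == 0 or (step < 0) != d or abs(step) > 3:
--             return k
--     return None
--
-- def _validate_tolerant(report) -> bool:
--     if not report:
--         return False
--     if len(report) <= 2:
--         return True
--     i = _first_violation(report)
--     if i is None:
--         return True
--     # A removal can only help if it touches the violating pair or the
--     # direction-setting head of the report.
--     return any(_first_violation(report[:j] + report[j + 1:]) is None
--                for j in (0, 1, i, i + 1))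
-- ===== Notes on version B (the rewrite author's own statement) =====
-- stated objective: faster
-- what changed: Instead of retrying the full validity scan after popping every index (O(n^2)), B scans once to the first violating adjacent pair and re-checks only the four removals (0, 1, i, i+1) that can possibly repair it, proven sufficient.
import Mathlib
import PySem

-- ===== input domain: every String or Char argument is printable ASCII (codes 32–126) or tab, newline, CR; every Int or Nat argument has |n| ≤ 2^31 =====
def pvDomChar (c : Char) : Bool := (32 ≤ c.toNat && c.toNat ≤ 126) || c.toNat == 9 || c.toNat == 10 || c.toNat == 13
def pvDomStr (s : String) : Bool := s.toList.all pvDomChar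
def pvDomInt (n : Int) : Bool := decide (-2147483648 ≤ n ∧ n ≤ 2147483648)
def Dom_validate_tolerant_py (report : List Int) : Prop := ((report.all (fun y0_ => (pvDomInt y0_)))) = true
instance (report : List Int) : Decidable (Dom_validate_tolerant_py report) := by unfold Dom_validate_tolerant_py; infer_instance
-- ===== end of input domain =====

-- B replaces A's try-every-removal scan by one scan to the first violating pair,
-- then tests only the four removals that can possibly repair it.

-- the per-pair test 'step == 0 or (step < 0) != direction or abs(step) > 3',
-- identical in both Python sources
def pvBad (d : Bool) (a b : Int) : Bool :=
  decide (a - b = 0) || (decide (a - b < 0) != d) || decide ((a - b).natAbs > 3)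

-- ===== PORT A =====
-- loop of _validate_exact: for n in range(len-1): check pair (report[n], report[n+1])
def pvAExactLoop (direction : Bool) : List Int → Bool
  | a :: b :: rest =>
      if pvBad direction a b then false
      else pvAExactLoop direction (b :: rest)
  | _ => true

-- _validate_exact; on a one-element list Python raises IndexError (excluded by Pre_),
-- the `[_] => false` branch only totalizes the port there.
def pvAExact (report : List Int) : Bool :=
  match report with
  | [] => false
  | [_] => false
  | a :: b :: rest => pvAExactLoop (decide (a - b < 0)) (a :: b :: rest)

def validate_tolerant_py (report : List Int) : Bool :=
  if pvAExact report then true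
  else (List.range report.length).any (fun i => pvAExact (report.eraseIdx i))

-- ===== PORT B =====
-- _first_violation's loop, carrying the running index k
def pvFV (d : Bool) (k : Nat) : List Int → Option Nat
  | a :: b :: rest =>
      if pvBad d a b then some k
      else pvFV d (k + 1) (b :: rest)
  | _ => none

-- _first_violation; B only calls it on lists with ≥ 2 elements, `_ => none` totalizes.
def pvFirstViolation (report : List Int) : Option Nat :=
  match report with
  | a :: b :: rest => pvFV (decide (a < b)) 0 (a :: b :: rest)
  | _ => none

def validate_tolerant_py_alt (report : List Int) : Bool :=
  match report with
  | [] => false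
  | [_] => true
  | [_, _] => true
  | _ =>
    match pvFirstViolation report with
    | none => true
    | some i =>
        [0, 1, i, i + 1].any (fun j => (pvFirstViolation (report.eraseIdx j)).isNone)

-- ===== PRECONDITION & SPEC =====
-- Pre_ excludes exactly the inputs where Python A raises IndexError: one-element
-- reports, and two-element reports whose single step is 0 or larger than 3
-- (there _validate_exact is False and the tolerant loop pops to a one-element list);
-- B simply returns True on those excluded reports (any length ≤ 2 report is safe after one removal).
def Pre_validate_tolerant_py (report : List Int) : Prop :=
  report.length ≠ 1 ∧
    (report.length = 2 →
      report.getD 0 0 ≠ report.getD 1 0 ∧ (report.getD 0 0 - report.getD 1 0).natAbs ≤ 3)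
instance (report : List Int) : Decidable (Pre_validate_tolerant_py report) := by
  unfold Pre_validate_tolerant_py; infer_instance

def pvWitness_validate_tolerant_py : List Int := [1, 2, 4, 5]

def Spec_validate_tolerant_py (report : List Int) (out : Bool) : Prop :=
  out = validate_tolerant_py_alt report
instance (report : List Int) (out : Bool) : Decidable (Spec_validate_tolerant_py report out) := by
  unfold Spec_validate_tolerant_py; infer_instance

-- ===== CLAIM (what is proved, stated in full; the proofs are below) =====
def Claim_equal_validate_tolerant_py : Prop :=
  ∀ (report : List Int), Dom_validate_tolerant_py report →
    Pre_validate_tolerant_py report →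
    Spec_validate_tolerant_py report (validate_tolerant_py report)

-- ===== LEMMAS AND PROOFS =====

-- A's exact loop is B's first-violation scan, viewed as a Bool
lemma loop_eq_fv (d : Bool) : ∀ (xs : List Int) (k : Nat),
    pvAExactLoop d xs = (pvFV d k xs).isNone := by
  intro xs
  induction xs with
  | nil => intro k; rfl
  | cons a t ih =>
      cases t with
      | nil => intro k; rfl
      | cons b r =>
          intro k
          simp only [pvAExactLoop, pvFV]
          cases hb : pvBad d a b with
          | true => simp
          | false => simpa using ih k.succ

lemma decide_sub_lt (a b : Int) : decide (a - b < 0) = decide (a < b) := by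
  simp [sub_neg]

-- characterization of pvFV = none : no adjacent pair is bad
lemma fv_none_iff (d : Bool) : ∀ (xs : List Int) (k : Nat),
    pvFV d k xs = none ↔ ∀ (m : Nat) (a b : Int), xs[m]? = some a → xs[m+1]? = some b →
      pvBad d a b = false := by
  intro xs
  induction xs with
  | nil =>
      intro k
      constructor
      · intro _ m a b ha _; simp at ha
      · intro _; rfl
  | cons a t ih =>
      cases t with
      | nil =>
          intro k
          constructor
          · intro _ m x y hx hy
            cases m with
            | zero => simp at hy
            | succ m => simp at hx
          · intro _; rfl
      | cons b r =>
          intro k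
          simp only [pvFV]
          cases hb : pvBad d a b with
          | true =>
              simp only [if_true]
              constructor
              · intro hc; cases hc
              · intro hall
                have := hall 0 a b rfl rfl
                rw [hb] at this; cases this
          | false =>
              simp only [if_false, Bool.false_eq_true]
              rw [ih (k+1)]
              constructor
              · intro hall m x y hx hy
                cases m with
                | zero =>
                    simp only [List.getElem?_cons_zero, Option.some.injEq] at hx
                    simp only [List.getElem?_cons_succ, List.getElem?_cons_zero,
                      Option.some.injEq] at hy
                    subst hx; subst hy; exact hb
                | succ m => exact hall m x y (by simpa using hx) (by simpa using hy)
              · intro hall m x y hx hy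
                exact hall (m+1) x y (by simpa using hx) (by simpa using hy)

-- characterization of pvFV = some : a bad pair at that index
lemma fv_some (d : Bool) : ∀ (xs : List Int) (k m : Nat),
    pvFV d k xs = some m → ∃ (j : Nat) (a b : Int), m = k + j ∧ xs[j]? = some a ∧
      xs[j+1]? = some b ∧ pvBad d a b = true := by
  intro xs
  induction xs with
  | nil => intro k m hm; simp [pvFV] at hm
  | cons a t ih =>
      cases t with
      | nil => intro k m hm; simp [pvFV] at hm
      | cons b r =>
          intro k m hm
          simp only [pvFV] at hm
          cases hb : pvBad d a b with
          | true =>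
              rw [hb] at hm
              simp only [if_true, Option.some.injEq] at hm
              exact ⟨0, a, b, by omega, rfl, rfl, hb⟩
          | false =>
              rw [hb] at hm
              simp only [if_false, Bool.false_eq_true] at hm
              obtain ⟨j, x, y, hj, hx, hy, hbad⟩ := ih (k+1) m hm
              exact ⟨j+1, x, y, by omega, by simpa using hx, by simpa using hy, hbad⟩

-- pvAExact = isNone of pvFirstViolation on lists of length ≥ 2
lemma exact_eq_fv (xs : List Int) (h : 2 ≤ xs.length) :
    pvAExact xs = (pvFirstViolation xs).isNone := by
  rcases xs with _ | ⟨a, _ | ⟨b, rest⟩⟩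
  · simp at h
  · simp at h
  · simp only [pvAExact, pvFirstViolation]
    rw [decide_sub_lt, loop_eq_fv]

-- head elements survive erasing an index ≥ 2
lemma fv_dir_erase (xs : List Int) (j : Nat) (hj : 2 ≤ j) (hlen : j < xs.length) :
    pvFirstViolation (xs.eraseIdx j) =
      pvFV (decide (xs.getD 0 0 < xs.getD 1 0)) 0 (xs.eraseIdx j) := by
  rcases xs with _ | ⟨a, _ | ⟨b, rest⟩⟩
  · simp at hlen
  · simp at hlen; omega
  · obtain ⟨n, rfl⟩ : ∃ n, j = n + 2 := ⟨j - 2, by omega⟩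
    have he : (a :: b :: rest).eraseIdx (n+2) = a :: b :: rest.eraseIdx n := rfl
    rw [he]
    simp [pvFirstViolation, List.getD]

-- MAIN LEMMA: with a violation at i, removing j ∉ {0,1,i,i+1} cannot repair the report
lemma no_repair (xs : List Int) (d : Bool) (i j : Nat)
    (hd : d = decide (xs.getD 0 0 < xs.getD 1 0))
    (hfv : pvFV d 0 xs = some i)
    (hj2 : 2 ≤ j) (hjlen : j < xs.length) (hji : j ≠ i) (hji1 : j ≠ i + 1) :
    (pvFirstViolation (xs.eraseIdx j)).isNone = false := by
  obtain ⟨i', a, b, hi', ha, hb, hbad⟩ := fv_some d xs 0 i hfv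
  have hii : i' = i := by omega
  rw [hii] at ha hb
  rw [fv_dir_erase xs j hj2 hjlen, ← hd]
  rcases Nat.lt_or_ge j i with hlt | hge
  · -- j < i: the bad pair sits at index i-1 of the erased list
    have h1 : (xs.eraseIdx j)[i-1]? = some a := by
      rw [List.getElem?_eraseIdx_of_ge (by omega)]
      have he : i - 1 + 1 = i := by omega
      rw [he]; exact ha
    have h2 : (xs.eraseIdx j)[(i-1)+1]? = some b := by
      rw [List.getElem?_eraseIdx_of_ge (by omega)]
      have he : i - 1 + 1 + 1 = i + 1 := by omega
      rw [he]; exact hb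
    cases hfe : pvFV d 0 (xs.eraseIdx j) with
    | some m => simp
    | none =>
        have := (fv_none_iff d _ 0).mp hfe (i-1) a b h1 h2
        rw [hbad] at this; cases this
  · -- j > i+1: the bad pair is untouched at index i
    have hgt : i + 1 < j := by omega
    have h1 : (xs.eraseIdx j)[i]? = some a := by
      rw [List.getElem?_eraseIdx_of_lt (by omega)]; exact ha
    have h2 : (xs.eraseIdx j)[i+1]? = some b := by
      rw [List.getElem?_eraseIdx_of_lt (by omega)]; exact hb
    cases hfe : pvFV d 0 (xs.eraseIdx j) with
    | some m => simp
    | none =>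
        have := (fv_none_iff d _ 0).mp hfe i a b h1 h2
        rw [hbad] at this; cases this

lemma erase_len2 (xs : List Int) (j : Nat) (h3 : 3 ≤ xs.length) (hj : j < xs.length) :
    2 ≤ (xs.eraseIdx j).length := by
  rw [List.length_eraseIdx_of_lt hj]; omega

-- ===== VERDICT (by name: the statement is the Claim_ definition above) =====
theorem validate_tolerant_py_spec : Claim_equal_validate_tolerant_py := by
  intro report _ hpre
  unfold Spec_validate_tolerant_py
  obtain ⟨hne1, h2⟩ := hpre
  rcases report with _ | ⟨a, _ | ⟨b, _ | ⟨c, rest⟩⟩⟩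
  · rfl
  · exact absurd rfl hne1
  · -- two-element report inside Pre_: both sides are true
    obtain ⟨hne, hle⟩ := h2 rfl
    simp only [List.getD, List.getElem?_cons_zero, List.getElem?_cons_succ,
      Option.getD_some] at hne hle
    have hbad : pvBad (decide (a < b)) a b = false := by
      unfold pvBad
      have h0 : decide (a - b = 0) = false := by simp; omega
      have h3 : decide ((a - b).natAbs > 3) = false := by simp; omega
      simp [h0, h3]
    have hex : pvAExact [a, b] = true := by
      simp only [pvAExact, pvAExactLoop, decide_sub_lt, hbad, if_false, Bool.false_eq_true]
    simp [validate_tolerant_py, hex, validate_tolerant_py_alt]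
  · -- length ≥ 3
    generalize hxs : a :: b :: c :: rest = xs at *
    have h3 : 3 ≤ xs.length := by rw [← hxs]; simp
    have hd0 : xs.getD 0 0 = a := by rw [← hxs]; rfl
    have hd1 : xs.getD 1 0 = b := by rw [← hxs]; rfl
    have hfveq : pvFirstViolation xs = pvFV (decide (a < b)) 0 xs := by
      rw [← hxs]; rfl
    have hBmatch : validate_tolerant_py_alt xs =
        match pvFirstViolation xs with
        | none => true
        | some i => [0, 1, i, i + 1].any (fun j => (pvFirstViolation (xs.eraseIdx j)).isNone) := by
      rw [← hxs]; rfl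
    have hexact : pvAExact xs = (pvFirstViolation xs).isNone :=
      exact_eq_fv xs (by omega)
    cases hfv : pvFirstViolation xs with
    | none =>
        have hex : pvAExact xs = true := by rw [hexact, hfv]; rfl
        rw [hBmatch, hfv]
        simp [validate_tolerant_py, hex]
    | some i =>
        have hexf : pvAExact xs = false := by rw [hexact, hfv]; rfl
        have hpred : ∀ j, j < xs.length →
            pvAExact (xs.eraseIdx j) = (pvFirstViolation (xs.eraseIdx j)).isNone := by
          intro j hj
          exact exact_eq_fv _ (erase_len2 xs j h3 hj)
        have hlen_i : i + 1 < xs.length := by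
          obtain ⟨i', x, y, hi', hx', hy, _⟩ :=
            fv_some (decide (a < b)) xs 0 i (by rw [← hfveq]; exact hfv)
          obtain ⟨hlt, -⟩ := List.getElem?_eq_some_iff.mp hy
          omega
        rw [hBmatch, hfv]
        simp only [validate_tolerant_py, hexf, Bool.false_eq_true, if_false]
        rcases hA : (List.range xs.length).any (fun j => pvAExact (xs.eraseIdx j)) with _ | _
        · -- A's scan found nothing; neither can any candidate
          simp only [List.any_eq_false, List.mem_range] at hA
          symm
          simp only [List.any_eq_false]
          intro j hj
          have hjlen : j < xs.length := by
            simp only [List.mem_cons, List.not_mem_nil, or_false] at hj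
            rcases hj with h | h | h | h <;> omega
          rw [← hpred j hjlen]
          exact hA j hjlen
        · -- A found a working removal j; it must be one of the candidates
          simp only [List.any_eq_true, List.mem_range] at hA
          obtain ⟨j, hjlen, hok⟩ := hA
          symm
          simp only [List.any_eq_true]
          by_cases hj2 : j < 2
          · refine ⟨j, ?_, by rw [← hpred j hjlen]; exact hok⟩
            interval_cases j <;> simp
          · rw [Nat.not_lt] at hj2
            by_cases hji : j = i
            · exact ⟨i, by simp, by rw [← hji, ← hpred j hjlen]; exact hok⟩
            by_cases hji1 : j = i + 1
            · exact ⟨i + 1, by simp, by rw [← hji1, ← hpred j hjlen]; exact hok⟩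
            exfalso
            have hnr := no_repair xs (decide (a < b)) i j (by rw [hd0, hd1])
              (by rw [← hfveq]; exact hfv) hj2 hjlen hji hji1
            rw [hpred j hjlen, hnr] at hok
            cases hok
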